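-- pv_equiv track=rewrite | github.com/luwei0917/DynamicBind | helper_functions.py | locate_ending_site
-- ===== SOURCE A (Python) =====
-- def locate_ending_site(raw_result_ref, raw_result_pdb):
--     # end when consecutively matched 10 residues.
--     match_count = 0
--     n = len(raw_result_ref)
--     # for raw_idx, (ref_res, ref_pdb) in enumerate(zip(raw_result_ref[::-1], raw_result_pdb[::-1])):
--     for idx in range(n-1, -1, -1):
--         ref_res = raw_result_ref[idx]
--         pdb_res = raw_result_pdb[idx]
--         if ref_res == pdb_res:
--             match_count += 1
--         else:
--             match_count = 0
--         if match_count == 10: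
--             return idx + 10
--     return -1
-- ===== SOURCE B (Python) =====
-- def locate_ending_site(raw_result_ref, raw_result_pdb):
--     # Forward single pass keeping the current consecutive-match run length;
--     # the last index whose run reaches 10 is the rightmost qualifying end.
--     run = 0
--     best = -1
--     for idx in range(len(raw_result_ref)):
--         if raw_result_ref[idx] == raw_result_pdb[idx]:
--             run += 1
--         else:
--             run = 0
--         if run >= 10:
--             best = idx
--     return best + 1 if best >= 0 else -1
-- ===== Notes on version B (the rewrite author's own statement) =====
-- stated objective: alternative
-- what changed: Replaced A's backward scan with early return on the first length-10 run by a single forward pass that keeps a run counter and records the last index whose run reaches 10, returning best+1 at the end.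
import Mathlib
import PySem

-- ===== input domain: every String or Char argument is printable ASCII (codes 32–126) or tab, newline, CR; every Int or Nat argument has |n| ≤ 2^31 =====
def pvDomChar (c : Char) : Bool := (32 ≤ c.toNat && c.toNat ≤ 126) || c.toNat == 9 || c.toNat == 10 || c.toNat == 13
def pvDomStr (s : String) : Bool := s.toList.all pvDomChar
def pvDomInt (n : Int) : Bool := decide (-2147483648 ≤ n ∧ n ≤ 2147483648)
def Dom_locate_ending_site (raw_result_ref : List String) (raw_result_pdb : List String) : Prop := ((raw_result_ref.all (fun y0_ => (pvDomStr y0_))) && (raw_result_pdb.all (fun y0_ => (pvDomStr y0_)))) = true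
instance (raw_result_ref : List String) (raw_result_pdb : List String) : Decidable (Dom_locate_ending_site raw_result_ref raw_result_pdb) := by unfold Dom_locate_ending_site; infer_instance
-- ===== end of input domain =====

-- B replaces A's backward scan with early return by a forward single pass that records the
-- last index whose consecutive-match run reaches 10 (objective: alternative decomposition).

-- ===== PORT A =====
-- A's loop: for idx in range(n-1, -1, -1) keeping match_count, early return idx+10 when it
-- hits 10.  Structural recursion on the descending index; list reads via getD (Pre_ keeps
-- every read index in range, matching Python's raw indexing).
def pvGoA (raw_result_ref : List String) (raw_result_pdb : List String) : Nat → Int → Int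
  | idx, match_count =>
    let ref_res := raw_result_ref.getD idx ""
    let pdb_res := raw_result_pdb.getD idx ""
    let mc := if ref_res == pdb_res then match_count + 1 else 0
    if mc = 10 then (idx : Int) + 10
    else
      match idx with
      | 0 => -1
      | i + 1 => pvGoA raw_result_ref raw_result_pdb i mc

def locate_ending_site (raw_result_ref : List String) (raw_result_pdb : List String) : Int :=
  match raw_result_ref.length with
  | 0 => -1
  | Nat.succ k => pvGoA raw_result_ref raw_result_pdb k 0

-- ===== PORT B =====
-- B's loop: forward fold over range(n) with state (run, best); return best+1 if best ≥ 0 else -1.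
def locate_ending_site_alt (raw_result_ref : List String) (raw_result_pdb : List String) : Int :=
  let st := (List.range raw_result_ref.length).foldl
    (fun (s : Int × Int) (idx : Nat) =>
      let run := if raw_result_ref.getD idx "" == raw_result_pdb.getD idx "" then s.1 + 1 else 0
      let best := if 10 ≤ run then (idx : Int) else s.2
      (run, best)) (0, -1)
  if 0 ≤ st.2 then st.2 + 1 else -1

-- ===== PRECONDITION & SPEC =====
-- Pre_ excludes exactly the inputs where Python A raises IndexError: a nonempty
-- raw_result_ref longer than raw_result_pdb (A reads raw_result_pdb[n-1] first).
def Pre_locate_ending_site (raw_result_ref : List String) (raw_result_pdb : List String) : Prop :=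
  raw_result_ref = [] ∨ raw_result_ref.length ≤ raw_result_pdb.length
instance (raw_result_ref : List String) (raw_result_pdb : List String) : Decidable (Pre_locate_ending_site raw_result_ref raw_result_pdb) := by unfold Pre_locate_ending_site; infer_instance

def pvWitness_locate_ending_site : List String × List String := (["a", "b"], ["a", "a"])

def Spec_locate_ending_site (raw_result_ref : List String) (raw_result_pdb : List String) (out : Int) : Prop := out = locate_ending_site_alt raw_result_ref raw_result_pdb
instance (raw_result_ref : List String) (raw_result_pdb : List String) (out : Int) : Decidable (Spec_locate_ending_site raw_result_ref raw_result_pdb out) := by unfold Spec_locate_ending_site; infer_instance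

-- ===== CLAIM (what is proved, stated in full; the proofs are below) =====
def Claim_equal_locate_ending_site : Prop := ∀ (raw_result_ref : List String) (raw_result_pdb : List String), Dom_locate_ending_site raw_result_ref raw_result_pdb → Pre_locate_ending_site raw_result_ref raw_result_pdb → Spec_locate_ending_site raw_result_ref raw_result_pdb (locate_ending_site raw_result_ref raw_result_pdb)

-- ===== LEMMAS AND PROOFS =====

-- match at index i (proof-only abbreviation)
def pvM (rf pd : List String) (i : Nat) : Bool := rf.getD i "" == pd.getD i ""

-- all ten indices i..i+9 match
def pvWin (m : Nat → Bool) (i : Nat) : Bool := (List.range 10).all fun j => m (i + j)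

-- common characterisation: (greatest e < n with e ≥ 9 and pvWin (e-9)) + 1, else -1
def pvSpec (m : Nat → Bool) : Nat → Int
  | 0 => -1
  | k + 1 => if 9 ≤ k ∧ pvWin m (k - 9) = true then (k : Int) + 1 else pvSpec m k

lemma pvGoA_zero (rf pd : List String) (mc : Int) :
    pvGoA rf pd 0 mc =
      (if (if rf.getD 0 "" == pd.getD 0 "" then mc + 1 else 0) = 10
       then ((0 : Nat) : Int) + 10 else -1) := by
  rw [pvGoA]

lemma pvGoA_succ (rf pd : List String) (i : Nat) (mc : Int) :
    pvGoA rf pd (i + 1) mc =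
      (if (if rf.getD (i + 1) "" == pd.getD (i + 1) "" then mc + 1 else 0) = 10
       then ((i + 1 : Nat) : Int) + 10
       else pvGoA rf pd i (if rf.getD (i + 1) "" == pd.getD (i + 1) "" then mc + 1 else 0)) := by
  rw [pvGoA]

lemma pvSpec_small (m : Nat → Bool) (n : Nat) (h : n ≤ 9) : pvSpec m n = -1 := by
  induction n with
  | zero => rfl
  | succ k ih =>
    simp only [pvSpec]
    rw [if_neg, ih (by omega)]
    rintro ⟨h9, _⟩; omega

lemma pvSpec_peel (m : Nat → Bool) (idx mc : Nat) (hf : m idx = false) (hmc : mc ≤ 9) :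
    pvSpec m (idx + 1 + mc) = pvSpec m idx := by
  induction mc with
  | zero =>
    show pvSpec m (idx + 1) = pvSpec m idx
    simp only [pvSpec]
    rw [if_neg]
    rintro ⟨h9, hw⟩
    simp only [pvWin, List.all_eq_true] at hw
    have h1 := hw 9 (List.mem_range.mpr (by omega))
    have e : idx - 9 + 9 = idx := by omega
    rw [e, hf] at h1
    exact Bool.false_ne_true h1
  | succ k ih =>
    have e : idx + 1 + (k + 1) = (idx + 1 + k) + 1 := by omega
    rw [e]
    simp only [pvSpec]
    rw [if_neg, ih (by omega)]
    rintro ⟨h9, hw⟩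
    simp only [pvWin, List.all_eq_true] at hw
    have h1 := hw (8 - k) (List.mem_range.mpr (by omega))
    have e2 : idx + 1 + k - 9 + (8 - k) = idx := by omega
    rw [e2, hf] at h1
    exact Bool.false_ne_true h1

lemma pvWin_build (m : Nat → Bool) (idx : Nat) (hm : m idx = true)
    (hrun : ∀ j, j < 9 → m (idx + 1 + j) = true) : pvWin m idx = true := by
  simp only [pvWin, List.all_eq_true]
  intro j hj
  rw [List.mem_range] at hj
  rcases j with _ | j'
  · simpa using hm
  · have e : idx + (j' + 1) = idx + 1 + j' := by omega
    rw [e]; exact hrun j' (by omega)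

lemma pvSpec_hit (m : Nat → Bool) (idx : Nat) (hw : pvWin m idx = true) :
    pvSpec m (idx + 1 + 9) = (idx : Int) + 10 := by
  have e : idx + 1 + 9 = (idx + 9) + 1 := by omega
  rw [e]
  simp only [pvSpec]
  rw [if_pos ⟨by omega, by rwa [Nat.add_sub_cancel]⟩]
  push_cast; ring

lemma pvGoA_eq_pvSpec (rf pd : List String) :
    ∀ (idx mc : Nat), mc ≤ 9 →
    (∀ j, j < mc → pvM rf pd (idx + 1 + j) = true) →
    pvGoA rf pd idx ((mc : Nat) : Int) = pvSpec (pvM rf pd) (idx + 1 + mc) := by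
  intro idx
  induction idx with
  | zero =>
    intro mc hmc hrun
    rw [pvGoA_zero]
    cases hm : rf.getD 0 "" == pd.getD 0 ""
    · rw [if_neg (by simp : ¬ (false = true)), if_neg (by norm_num : ¬ (0 : Int) = 10)]
      rw [pvSpec_peel (pvM rf pd) 0 mc hm hmc]
      exact (pvSpec_small (pvM rf pd) 0 (by omega)).symm
    · rw [if_pos rfl]
      by_cases h9 : mc = 9
      · subst h9
        rw [if_pos (by norm_num)]
        have hw : pvWin (pvM rf pd) 0 = true :=
          pvWin_build (pvM rf pd) 0 hm (fun j hj => hrun j (by omega))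
        exact (pvSpec_hit (pvM rf pd) 0 hw).symm
      · rw [if_neg (by omega : ¬ ((mc : Nat) : Int) + 1 = 10)]
        rw [pvSpec_small (pvM rf pd) (0 + 1 + mc) (by omega)]
  | succ i ih =>
    intro mc hmc hrun
    rw [pvGoA_succ]
    cases hm : rf.getD (i + 1) "" == pd.getD (i + 1) ""
    · rw [if_neg (by simp : ¬ (false = true)), if_neg (by norm_num : ¬ (0 : Int) = 10)]
      rw [show (0 : Int) = ((0 : Nat) : Int) by norm_num]
      rw [ih 0 (by omega) (fun j hj => absurd hj (Nat.not_lt_zero j))]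
      rw [pvSpec_peel (pvM rf pd) (i + 1) mc hm hmc]
    · rw [if_pos rfl]
      by_cases h9 : mc = 9
      · subst h9
        rw [if_pos (by norm_num)]
        have hw : pvWin (pvM rf pd) (i + 1) = true :=
          pvWin_build (pvM rf pd) (i + 1) hm (fun j hj => hrun j (by omega))
        exact (pvSpec_hit (pvM rf pd) (i + 1) hw).symm
      · rw [if_neg (by omega : ¬ ((mc : Nat) : Int) + 1 = 10)]
        rw [show ((mc : Nat) : Int) + 1 = (((mc + 1 : Nat)) : Int) by push_cast; ring]
        have hrun' : ∀ j, j < mc + 1 → pvM rf pd (i + 1 + j) = true := by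
          intro j hj
          rcases j with _ | j'
          · exact hm
          · have e : i + 1 + (j' + 1) = (i + 1) + 1 + j' := by omega
            rw [e]; exact hrun j' (by omega)
        rw [ih (mc + 1) (by omega) hrun']
        have e : i + 1 + (mc + 1) = i + 1 + 1 + mc := by omega
        rw [e]

lemma pvA_eq_spec (rf pd : List String) :
    locate_ending_site rf pd = pvSpec (pvM rf pd) rf.length := by
  unfold locate_ending_site
  cases hL : rf.length with
  | zero => rfl
  | succ k =>
    have h := pvGoA_eq_pvSpec rf pd k 0 (by omega) (fun j hj => absurd hj (Nat.not_lt_zero j))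
    simpa using h

lemma pvFoldB (rf pd : List String) (k : Nat) :
    ∃ (rn : Nat) (best : Int),
      (List.range k).foldl
        (fun (s : Int × Int) (idx : Nat) =>
          let run := if rf.getD idx "" == pd.getD idx "" then s.1 + 1 else 0
          let best := if 10 ≤ run then (idx : Int) else s.2
          (run, best)) (0, -1) = ((rn : Int), best) ∧
      rn ≤ k ∧ (∀ j, j < rn → pvM rf pd (k - 1 - j) = true) ∧
      (rn = k ∨ pvM rf pd (k - 1 - rn) = false) ∧
      ((best = -1 ∧ pvSpec (pvM rf pd) k = -1) ∨ (0 ≤ best ∧ pvSpec (pvM rf pd) k = best + 1)) := by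
  induction k with
  | zero =>
    refine ⟨0, -1, by norm_num, by omega, fun j hj => absurd hj (Nat.not_lt_zero j),
      Or.inl rfl, Or.inl ⟨rfl, rfl⟩⟩
  | succ k ih =>
    obtain ⟨rn, best, hfold, hle, hrun, hex, hbest⟩ := ih
    have hstep : (List.range (k + 1)).foldl
        (fun (s : Int × Int) (idx : Nat) =>
          let run := if rf.getD idx "" == pd.getD idx "" then s.1 + 1 else 0
          let best := if 10 ≤ run then (idx : Int) else s.2
          (run, best)) (0, -1)
        = (if rf.getD k "" == pd.getD k "" then (rn : Int) + 1 else 0,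
           if 10 ≤ (if rf.getD k "" == pd.getD k "" then (rn : Int) + 1 else 0)
           then (k : Int) else best) := by
      rw [List.range_succ, List.foldl_append, hfold]
      rfl
    cases hm : rf.getD k "" == pd.getD k ""
    · rw [hm] at hstep
      rw [if_neg (by simp : ¬ (false = true)), if_neg (by norm_num : ¬ (10 : Int) ≤ 0)] at hstep
      refine ⟨0, best, ?_, by omega, fun j hj => absurd hj (Nat.not_lt_zero j), ?_, ?_⟩
      · rw [hstep]; norm_num
      · refine Or.inr ?_
        have e : k + 1 - 1 - 0 = k := by omega
        rw [e]; exact hm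
      · have hEq : pvSpec (pvM rf pd) (k + 1) = pvSpec (pvM rf pd) k := by
          simp only [pvSpec]
          rw [if_neg]
          rintro ⟨h9, hw⟩
          simp only [pvWin, List.all_eq_true] at hw
          have h1 := hw 9 (List.mem_range.mpr (by omega))
          have e : k - 9 + 9 = k := by omega
          rw [e] at h1
          have hmf : pvM rf pd k = false := hm
          rw [hmf] at h1
          exact Bool.false_ne_true h1
        rw [hEq]; exact hbest
    · rw [hm] at hstep
      rw [if_pos rfl] at hstep
      by_cases hr : 9 ≤ rn
      · rw [if_pos (by omega : (10 : Int) ≤ ((rn : Nat) : Int) + 1)] at hstep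
        refine ⟨rn + 1, (k : Int), ?_, by omega, ?_, ?_, ?_⟩
        · rw [hstep]; push_cast; rfl
        · intro j hj
          rcases j with _ | j'
          · have e : k + 1 - 1 - 0 = k := by omega
            rw [e]; exact hm
          · have e : k + 1 - 1 - (j' + 1) = k - 1 - j' := by omega
            rw [e]; exact hrun j' (by omega)
        · rcases hex with h | h
          · exact Or.inl (by omega)
          · refine Or.inr ?_
            have e : k + 1 - 1 - (rn + 1) = k - 1 - rn := by omega
            rw [e]; exact h
        · have h9k : 9 ≤ k := by omega
          have hw : pvWin (pvM rf pd) (k - 9) = true := by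
            simp only [pvWin, List.all_eq_true]
            intro j hj
            rw [List.mem_range] at hj
            by_cases hj9 : j = 9
            · subst hj9
              have e : k - 9 + 9 = k := by omega
              rw [e]; exact hm
            · have e : k - 9 + j = k - 1 - (8 - j) := by omega
              rw [e]; exact hrun (8 - j) (by omega)
          refine Or.inr ⟨by omega, ?_⟩
          simp only [pvSpec]
          rw [if_pos ⟨h9k, hw⟩]
      · rw [if_neg (by omega : ¬ (10 : Int) ≤ ((rn : Nat) : Int) + 1)] at hstep
        refine ⟨rn + 1, best, ?_, by omega, ?_, ?_, ?_⟩
        · rw [hstep]; push_cast; rfl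
        · intro j hj
          rcases j with _ | j'
          · have e : k + 1 - 1 - 0 = k := by omega
            rw [e]; exact hm
          · have e : k + 1 - 1 - (j' + 1) = k - 1 - j' := by omega
            rw [e]; exact hrun j' (by omega)
        · rcases hex with h | h
          · exact Or.inl (by omega)
          · refine Or.inr ?_
            have e : k + 1 - 1 - (rn + 1) = k - 1 - rn := by omega
            rw [e]; exact h
        · have hEq : pvSpec (pvM rf pd) (k + 1) = pvSpec (pvM rf pd) k := by
            simp only [pvSpec]
            rw [if_neg]
            rintro ⟨h9, hw⟩
            simp only [pvWin, List.all_eq_true] at hw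
            rcases hex with h | hf
            · omega
            · have h1 := hw (8 - rn) (List.mem_range.mpr (by omega))
              have e : k - 9 + (8 - rn) = k - 1 - rn := by omega
              rw [e, hf] at h1
              exact Bool.false_ne_true h1
          rw [hEq]; exact hbest

lemma pvB_eq_spec (rf pd : List String) :
    locate_ending_site_alt rf pd = pvSpec (pvM rf pd) rf.length := by
  unfold locate_ending_site_alt
  obtain ⟨rn, best, hfold, -, -, -, hbest⟩ := pvFoldB rf pd rf.length
  simp only [hfold]
  rcases hbest with ⟨h1, h2⟩ | ⟨h1, h2⟩
  · rw [h1, if_neg (by norm_num : ¬ (0 : Int) ≤ -1), h2]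
  · rw [if_pos h1, h2]

-- ===== VERDICT (by name: the statement is the Claim_ definition above) =====
theorem locate_ending_site_spec : Claim_equal_locate_ending_site := by
  intro rf pd _ _
  show locate_ending_site rf pd = locate_ending_site_alt rf pd
  rw [pvA_eq_spec, pvB_eq_spec]
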